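-- pv_equiv track=rewrite | github.com/248Tech/carrion-spine | carrion_spine/discovery.py | disambiguate_nickname
-- ===== SOURCE A (Python) =====
-- def disambiguate_nickname(base: str, used: set[str]) -> str:
--     if base not in used:
--         used.add(base)
--         return base
--     i = 2
--     while True:
--         candidate = f"{base}-{i}"
--         if candidate not in used:
--             used.add(candidate)
--             return candidate
--         i += 1
-- ===== SOURCE B (Python) =====
-- def disambiguate_nickname(base: str, used: set) -> str:
--     if base not in used:
--         used.add(base)
--         return base
--     prefix = base + "-"
--     m = len(used)
--     # direct-address table: slot j stands for the candidate number j + 2;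
--     # among the m + 1 slots 2 .. m+2 at most m can be taken, so a free one exists
--     seen = [False] * (m + 1)
--     for name in used:
--         if name.startswith(prefix):
--             s = name[len(prefix):]
--             if s.isdigit() and s[0] != "0":          # canonical decimal, no leading zero
--                 n = 0
--                 for ch in s:
--                     n = 10 * n + (ord(ch) - 48)
--                 if 2 <= n <= m + 2:
--                     seen[n - 2] = True
--     candidate = f"{base}-{seen.index(False) + 2}"
--     used.add(candidate)
--     return candidate
-- ===== Notes on version B (the rewrite author's own statement) =====
-- stated objective: alternative
-- what changed: A probes the set with candidate strings base-2, base-3, ... until one is free; B never probes: it makes one pass over used parsing each canonical numeric suffix of base- into a direct-address boolean table of the len(used)+1 possible slots 2..len(used)+2 (pigeonhole guarantees a free slot) and returns the first unmarked slot.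
import Mathlib
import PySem

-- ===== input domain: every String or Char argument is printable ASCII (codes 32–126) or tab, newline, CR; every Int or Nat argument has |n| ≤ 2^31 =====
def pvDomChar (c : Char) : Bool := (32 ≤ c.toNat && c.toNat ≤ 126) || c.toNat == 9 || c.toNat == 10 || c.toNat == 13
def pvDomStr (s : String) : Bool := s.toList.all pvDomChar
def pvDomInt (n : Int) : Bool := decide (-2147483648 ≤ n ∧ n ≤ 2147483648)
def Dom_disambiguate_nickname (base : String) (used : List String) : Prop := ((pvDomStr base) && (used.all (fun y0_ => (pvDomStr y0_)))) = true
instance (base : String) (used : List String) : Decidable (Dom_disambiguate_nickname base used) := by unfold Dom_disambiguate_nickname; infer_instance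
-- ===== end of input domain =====

-- B replaces A's candidate-by-candidate probing of `used` with a direct-address boolean
-- table: one pass over `used` parses each canonical numeric suffix of "base-" into a slot
-- of a (len(used)+1)-entry table for the candidate numbers 2..len(used)+2 (pigeonhole: a
-- free slot exists), and the answer is the first unmarked slot (objective: alternative).
-- Both A and B also add the chosen name to `used` (the Python set); the equivalence proved
-- here is about the return value only.

-- ===== PORT A =====
-- the `while True` loop of A; the fuel only totalises it (used.length + 1 steps always
-- suffice, proved below), each step is exactly A's loop body
def pvLoopA (base : String) (used : List String) : Nat → Int → String
  | 0, i => base ++ "-" ++ PySem.Int.toStr i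
  | f + 1, i =>
    let candidate := base ++ "-" ++ PySem.Int.toStr i
    if candidate ∈ used then pvLoopA base used f (i + 1) else candidate

def disambiguate_nickname (base : String) (used : List String) : String :=
  if base ∈ used then pvLoopA base used (used.length + 1) 2 else base

-- ===== PORT B =====
-- the inner `for ch in s: n = 10 * n + (ord(ch) - 48)` loop of B
def pvParse (cs : List Char) : Int := cs.foldl (fun a c => 10 * a + ((c.toNat : Int) - 48)) 0

-- B's `s = name[len(prefix):]`
def pvSuffix (base name : String) : String :=
  PySem.Str.slice name (some (PySem.Str.len (base ++ "-"))) none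

-- the body of B's `for name in used` loop (m = len(used))
def pvMarkStep (base : String) (m : Nat) (seen : List Bool) (name : String) : List Bool :=
  if PySem.Str.startswith name (base ++ "-") = true then
    if PySem.Str.strIsdigit (pvSuffix base name) = true ∧
        PySem.Str.pyGet? (pvSuffix base name) 0 ≠ some '0' then
      if 2 ≤ pvParse (pvSuffix base name).toList ∧
          pvParse (pvSuffix base name).toList ≤ (m : Int) + 2 then
        PySem.List.pySetD seen (pvParse (pvSuffix base name).toList - 2) true
      else seen
    else seen
  else seen

def disambiguate_nickname_alt (base : String) (used : List String) : String :=
  if base ∈ used then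
    let seen := used.foldl (pvMarkStep base used.length) (List.replicate (used.length + 1) false)
    -- Python `seen.index(False)`: False is always present (proved below), getD totalises
    base ++ "-" ++ PySem.Int.toStr (((PySem.List.index? seen false).getD 0 : Int) + 2)
  else base

-- ===== PRECONDITION & SPEC =====
def Spec_disambiguate_nickname (base : String) (used : List String) (out : String) : Prop := out = disambiguate_nickname_alt base used
instance (base : String) (used : List String) (out : String) : Decidable (Spec_disambiguate_nickname base used out) := by unfold Spec_disambiguate_nickname; infer_instance

-- ===== CLAIM (what is proved, stated in full; the proofs are below) =====
def Claim_equal_disambiguate_nickname : Prop := ∀ (base : String) (used : List String), Dom_disambiguate_nickname base used → Spec_disambiguate_nickname base used (disambiguate_nickname base used)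

-- ===== LEMMAS AND PROOFS =====

-- decoding a digit string (Nat form of pvParse); left inverse of Nat.toDigits 10
def pvDecode (cs : List Char) : Nat := cs.foldl (fun a c => a * 10 + (c.toNat - 48)) 0

theorem pv_toDigitsCore_spill (b f : Nat) : ∀ (n : Nat) (l : List Char),
    Nat.toDigitsCore b f n l = Nat.toDigitsCore b f n [] ++ l := by
  induction f with
  | zero => intro n l; simp [Nat.toDigitsCore]
  | succ f ih =>
    intro n l
    simp only [Nat.toDigitsCore]
    by_cases h : n / b = 0
    · simp [h]
    · rw [if_neg h, if_neg h, ih (n / b) ((n % b).digitChar :: l), ih (n / b) [(n % b).digitChar]]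
      simp

theorem pv_digitChar_toNat (d : Nat) (hd : d < 10) : (Nat.digitChar d).toNat = 48 + d := by
  interval_cases d <;> decide

theorem pv_decode_core (f : Nat) : ∀ n : Nat, n < 10 ^ f →
    pvDecode (Nat.toDigitsCore 10 f n []) = n := by
  induction f with
  | zero => intro n hn; interval_cases n; decide
  | succ f ih =>
    intro n hn
    simp only [Nat.toDigitsCore]
    by_cases h : n / 10 = 0
    · have hn10 : n < 10 := by omega
      simp [h, pvDecode, pv_digitChar_toNat (n % 10) (by omega)]
      omega
    · rw [if_neg h, pv_toDigitsCore_spill]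
      have hlt : n / 10 < 10 ^ f := by
        rw [pow_succ] at hn
        exact Nat.div_lt_of_lt_mul (by omega)
      have := ih (n / 10) hlt
      simp only [pvDecode] at this ⊢
      rw [List.foldl_append, this]
      simp [pv_digitChar_toNat (n % 10) (by omega)]
      omega

theorem pv_decode_toDigits (n : Nat) : pvDecode (Nat.toDigits 10 n) = n := by
  have : n < 10 ^ (n + 1) := by
    calc n < n + 1 := Nat.lt_succ_self n
    _ ≤ 10 ^ (n + 1) := Nat.le_of_lt (Nat.lt_pow_self (by norm_num))
  exact pv_decode_core (n + 1) n this

theorem pv_toChars_inj_nonneg (i j : Int) (hi : 0 ≤ i) (hj : 0 ≤ j)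
    (h : PySem.Int.toChars i = PySem.Int.toChars j) : i = j := by
  simp only [PySem.Int.toChars, if_neg (by omega : ¬ i < 0), if_neg (by omega : ¬ j < 0)] at h
  have := congrArg pvDecode h
  rw [pv_decode_toDigits, pv_decode_toDigits] at this
  omega

-- the candidate string f"{base}-{i}"
theorem pv_cand_toList (base : String) (i : Int) :
    (base ++ "-" ++ PySem.Int.toStr i).toList = (base ++ "-").toList ++ PySem.Int.toChars i := by
  rw [String.toList_append, PySem.Int.toList_toStr]

theorem pv_toList_inj {s t : String} (h : s.toList = t.toList) : s = t := by
  have := congrArg String.ofList h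
  simpa using this

theorem pv_cand_inj (base : String) (i j : Int) (hi : 0 ≤ i) (hj : 0 ≤ j)
    (h : base ++ "-" ++ PySem.Int.toStr i = base ++ "-" ++ PySem.Int.toStr j) : i = j := by
  have h' := congrArg String.toList h
  rw [pv_cand_toList, pv_cand_toList] at h'
  exact pv_toChars_inj_nonneg i j hi hj (List.append_cancel_left h')

-- pigeonhole: some index below L.length + 1 yields a string not in L
theorem pv_exists_not_mem (g : Nat → String) (hg : ∀ a b, g a = g b → a = b) (L : List String) :
    ∃ j : Nat, j < L.length + 1 ∧ g j ∉ L := by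
  by_contra hc
  push Not at hc
  have hsub : (Finset.range (L.length + 1)).image g ⊆ L.toFinset := by
    intro s hs
    simp only [Finset.mem_image, Finset.mem_range] at hs
    obtain ⟨j, hj, rfl⟩ := hs
    exact List.mem_toFinset.mpr (hc j hj)
  have h1 : ((Finset.range (L.length + 1)).image g).card = L.length + 1 := by
    rw [Finset.card_image_of_injOn (fun a _ b _ hab => hg a b hab), Finset.card_range]
  have h2 := Finset.card_le_card hsub
  have h3 := L.toFinset_card_le
  omega

-- A's fuel loop computes a generic first-miss scan
def pvScan (p : Int → Bool) : Nat → Int → Int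
  | 0, i => i
  | f + 1, i => if p i then pvScan p f (i + 1) else i

theorem pv_loopA_eq_scan (base : String) (used : List String) (f : Nat) (i : Int) :
    pvLoopA base used f i =
      base ++ "-" ++ PySem.Int.toStr (pvScan (fun k => decide (base ++ "-" ++ PySem.Int.toStr k ∈ used)) f i) := by
  induction f generalizing i with
  | zero => simp [pvLoopA, pvScan]
  | succ f ih =>
    simp only [pvLoopA, pvScan, decide_eq_true_eq]
    split_ifs with h
    · exact ih (i + 1)
    · rfl

-- the scan returns the first miss once the fuel reaches it
theorem pv_scan_eq (p : Int → Bool) : ∀ (fuel : Nat) (i M : Int), i ≤ M → (M - i).toNat < fuel →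
    (∀ j, i ≤ j → j < M → p j = true) → p M = false → pvScan p fuel i = M := by
  intro fuel
  induction fuel with
  | zero => intro i M h1 h2 _ _; omega
  | succ fuel ih =>
    intro i M h1 h2 hall hM
    by_cases hiM : i = M
    · subst hiM; simp [pvScan, hM]
    · have hi : p i = true := hall i le_rfl (by omega)
      simp only [pvScan, hi, if_true]
      exact ih (i + 1) M (by omega) (by omega) (fun j hj1 hj2 => hall j (by omega) hj2) hM

-- digit-char facts
theorem pv_isdigit_bounds (c : Char) (h : PySem.Chars.isdigit c = true) :
    48 ≤ c.toNat ∧ c.toNat ≤ 57 := by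
  simp only [PySem.Chars.isdigit, Bool.and_eq_true, decide_eq_true_eq] at h
  obtain ⟨h1, h2⟩ := h
  exact ⟨h1, h2⟩

theorem pv_char_of_toNat_48 (c : Char) (h : c.toNat = 48) : c = '0' := by
  have : c.val = '0'.val := by
    apply UInt32.toNat_inj.mp
    simpa using h
  exact Char.ext this

theorem pv_digitChar_isdigit (d : Nat) (hd : d < 10) :
    PySem.Chars.isdigit (Nat.digitChar d) = true := by
  interval_cases d <;> decide

-- Nat.toDigits produces digits / is nonempty / has a nonzero leading digit
theorem pv_digits_toDigitsCore (f : Nat) : ∀ (n : Nat) (c : Char),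
    c ∈ Nat.toDigitsCore 10 f n [] → PySem.Chars.isdigit c = true := by
  induction f with
  | zero => intro n c hc; simp [Nat.toDigitsCore] at hc
  | succ f ih =>
    intro n c hc
    simp only [Nat.toDigitsCore] at hc
    by_cases h : n / 10 = 0
    · rw [if_pos h] at hc
      simp at hc
      subst hc
      exact pv_digitChar_isdigit (n % 10) (by omega)
    · rw [if_neg h, pv_toDigitsCore_spill] at hc
      rcases List.mem_append.mp hc with h1 | h1
      · exact ih (n / 10) c h1
      · simp at h1
        subst h1
        exact pv_digitChar_isdigit (n % 10) (by omega)

theorem pv_toDigitsCore_ne_nil (f n : Nat) (hf : 1 ≤ f) : Nat.toDigitsCore 10 f n [] ≠ [] := by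
  cases f with
  | zero => omega
  | succ f =>
    simp only [Nat.toDigitsCore]
    by_cases h : n / 10 = 0
    · simp [h]
    · rw [if_neg h, pv_toDigitsCore_spill]
      simp

theorem pv_head_ne_zero (f : Nat) : ∀ (n : Nat), 1 ≤ n → n < 10 ^ f →
    ∀ (c : Char) (t : List Char), Nat.toDigitsCore 10 f n [] = c :: t → c ≠ '0' := by
  induction f with
  | zero => intro n h1 h2; omega
  | succ f ih =>
    intro n h1 h2 c t heq
    simp only [Nat.toDigitsCore] at heq
    by_cases h : n / 10 = 0
    · rw [if_pos h] at heq
      have hn : n % 10 = n := by omega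
      rw [hn] at heq
      have hc : c = Nat.digitChar n := (List.cons.injEq _ _ _ _ ▸ heq).1.symm
      subst hc
      have h10 : n < 10 := by omega
      interval_cases n <;> decide
    · rw [if_neg h, pv_toDigitsCore_spill] at heq
      have hd : n / 10 ≥ 1 := by omega
      have hlt : n / 10 < 10 ^ f := by
        rw [pow_succ] at h2
        exact Nat.div_lt_of_lt_mul (by omega)
      have hf1 : 1 ≤ f := by
        by_contra hf0
        have : f = 0 := by omega
        subst this
        simp at hlt
        omega
      obtain ⟨c', t', hct⟩ := List.exists_cons_of_ne_nil (pv_toDigitsCore_ne_nil f (n / 10) hf1)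
      rw [hct] at heq
      simp at heq
      obtain ⟨hc, -⟩ := heq
      subst hc
      exact ih (n / 10) hd hlt c' t' hct

-- pvDecode / pvParse arithmetic
theorem pv_foldNat (cs : List Char) : ∀ a : Nat,
    cs.foldl (fun a c => a * 10 + (c.toNat - 48)) a = a * 10 ^ cs.length + pvDecode cs := by
  induction cs with
  | nil => intro a; simp [pvDecode]
  | cons c cs ih =>
    intro a
    have h1 : pvDecode (c :: cs) = (c.toNat - 48) * 10 ^ cs.length + pvDecode cs := by
      simp only [pvDecode, List.foldl_cons, Nat.zero_mul, Nat.zero_add]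
      rw [ih (c.toNat - 48)]
      simp [pvDecode]
    simp only [List.foldl_cons, List.length_cons, h1]
    rw [ih (a * 10 + (c.toNat - 48))]
    ring

theorem pv_decode_cons (c : Char) (cs : List Char) :
    pvDecode (c :: cs) = (c.toNat - 48) * 10 ^ cs.length + pvDecode cs := by
  simp only [pvDecode, List.foldl_cons, Nat.zero_mul, Nat.zero_add]
  rw [pv_foldNat cs (c.toNat - 48)]
  simp [pvDecode]

theorem pv_parse_eq_decode_aux (cs : List Char) : ∀ a : Nat,
    (∀ c ∈ cs, PySem.Chars.isdigit c = true) →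
    cs.foldl (fun a c => 10 * a + ((c.toNat : Int) - 48)) (a : Int)
      = ((cs.foldl (fun a c => a * 10 + (c.toNat - 48)) a : Nat) : Int) := by
  induction cs with
  | nil => intro a _; simp
  | cons c cs ih =>
    intro a hall
    have hb := pv_isdigit_bounds c (hall c (List.mem_cons_self))
    have hstep : 10 * (a : Int) + ((c.toNat : Int) - 48) = ((a * 10 + (c.toNat - 48) : Nat) : Int) := by
      push_cast [Nat.cast_sub hb.1]
      ring
    simp only [List.foldl_cons]
    rw [hstep, ih (a * 10 + (c.toNat - 48)) (fun d hd => hall d (List.mem_cons_of_mem _ hd))]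

theorem pv_parse_eq_decode (cs : List Char) (h : ∀ c ∈ cs, PySem.Chars.isdigit c = true) :
    pvParse cs = (pvDecode cs : Int) := by
  have := pv_parse_eq_decode_aux cs 0 h
  simpa [pvParse, pvDecode] using this

theorem pv_decode_lt (cs : List Char) (h : ∀ c ∈ cs, PySem.Chars.isdigit c = true) :
    pvDecode cs < 10 ^ cs.length := by
  induction cs with
  | nil => simp [pvDecode]
  | cons c cs ih =>
    have hb := pv_isdigit_bounds c (h c (List.mem_cons_self))
    have h1 := ih (fun d hd => h d (List.mem_cons_of_mem _ hd))
    rw [pv_decode_cons, List.length_cons, pow_succ]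
    have hx : c.toNat - 48 ≤ 9 := by omega
    have := Nat.mul_le_mul_right (10 ^ cs.length) hx
    omega

theorem pv_decode_ge (c : Char) (cs : List Char) (hd : PySem.Chars.isdigit c = true)
    (hne : c ≠ '0') : 10 ^ cs.length ≤ pvDecode (c :: cs) := by
  have hb := pv_isdigit_bounds c hd
  have h48 : c.toNat ≠ 48 := fun h => hne (pv_char_of_toNat_48 c h)
  have hx : 1 ≤ c.toNat - 48 := by omega
  rw [pv_decode_cons]
  have := Nat.mul_le_mul_right (10 ^ cs.length) hx
  omega

-- injectivity of pvDecode on digit strings of equal length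
theorem pv_decode_inj_len (s : List Char) : ∀ t : List Char, s.length = t.length →
    (∀ c ∈ s, PySem.Chars.isdigit c = true) → (∀ c ∈ t, PySem.Chars.isdigit c = true) →
    pvDecode s = pvDecode t → s = t := by
  induction s with
  | nil => intro t hlen _ _ _; cases t with | nil => rfl | cons d t => simp at hlen
  | cons c s ih =>
    intro t hlen hs ht heq
    cases t with
    | nil => simp at hlen
    | cons d t =>
      have hlen' : s.length = t.length := by simpa using hlen
      have hcs := pv_isdigit_bounds c (hs c (List.mem_cons_self))
      have hds := pv_isdigit_bounds d (ht d (List.mem_cons_self))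
      have hslt : pvDecode s < 10 ^ s.length := pv_decode_lt s (fun e he => hs e (List.mem_cons_of_mem _ he))
      have htlt : pvDecode t < 10 ^ t.length := pv_decode_lt t (fun e he => ht e (List.mem_cons_of_mem _ he))
      rw [pv_decode_cons, pv_decode_cons, hlen'] at heq
      set Q := 10 ^ t.length with hQ
      have hQ0 : 0 < Q := Nat.pow_pos (by norm_num)
      rw [hlen'] at hslt
      have hxy : c.toNat - 48 = d.toNat - 48 ∧ pvDecode s = pvDecode t := by
        constructor
        · have h1 : ((c.toNat - 48) * Q + pvDecode s) / Q = c.toNat - 48 := by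
            rw [Nat.mul_comm, Nat.mul_add_div hQ0, Nat.div_eq_of_lt hslt]; omega
          have h2 : ((d.toNat - 48) * Q + pvDecode t) / Q = d.toNat - 48 := by
            rw [Nat.mul_comm, Nat.mul_add_div hQ0, Nat.div_eq_of_lt htlt]; omega
          rw [← h1, ← h2, heq]
        · have h1 : ((c.toNat - 48) * Q + pvDecode s) % Q = pvDecode s := by
            rw [Nat.mul_comm, Nat.mul_add_mod, Nat.mod_eq_of_lt hslt]
          have h2 : ((d.toNat - 48) * Q + pvDecode t) % Q = pvDecode t := by
            rw [Nat.mul_comm, Nat.mul_add_mod, Nat.mod_eq_of_lt htlt]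
          rw [← h1, ← h2, heq]
      have hcd : c = d := by
        have : c.toNat = d.toNat := by omega
        have hv : c.val = d.val := UInt32.toNat_inj.mp (by simpa using this)
        exact Char.ext hv
      rw [hcd, ih t hlen' (fun e he => hs e (List.mem_cons_of_mem _ he))
        (fun e he => ht e (List.mem_cons_of_mem _ he)) hxy.2]

-- round trip: a canonical digit string is Nat.toDigits of its value
theorem pv_toDigits_decode (s : List Char) (hne : s ≠ [])
    (hdig : ∀ c ∈ s, PySem.Chars.isdigit c = true)
    (hhead : ∀ c t, s = c :: t → c ≠ '0') :
    Nat.toDigits 10 (pvDecode s) = s := by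
  obtain ⟨c, u, rfl⟩ := List.exists_cons_of_ne_nil hne
  have hc0 := hhead c u rfl
  have hge : 10 ^ u.length ≤ pvDecode (c :: u) :=
    pv_decode_ge c u (hdig c (List.mem_cons_self)) hc0
  have hpos : 1 ≤ pvDecode (c :: u) := le_trans (Nat.one_le_pow _ _ (by norm_num)) hge
  set k := pvDecode (c :: u) with hk
  have hdigk : ∀ e ∈ Nat.toDigits 10 k, PySem.Chars.isdigit e = true := by
    intro e he
    exact pv_digits_toDigitsCore (k + 1) k e he
  have hklt : k < 10 ^ (k + 1) := by
    calc k < k + 1 := Nat.lt_succ_self k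
    _ ≤ 10 ^ (k + 1) := Nat.le_of_lt (Nat.lt_pow_self (by norm_num))
  have hkne : Nat.toDigits 10 k ≠ [] := pv_toDigitsCore_ne_nil (k + 1) k (by omega)
  obtain ⟨d, v, hdv⟩ := List.exists_cons_of_ne_nil hkne
  have hd0 : d ≠ '0' := pv_head_ne_zero (k + 1) k hpos hklt d v hdv
  have hdec : pvDecode (Nat.toDigits 10 k) = k := pv_decode_toDigits k
  -- lengths agree via the two-sided bounds
  have hge2 : 10 ^ v.length ≤ k := by
    rw [← hdec, hdv]
    exact pv_decode_ge d v (hdigk d (hdv ▸ List.mem_cons_self)) hd0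
  have hlt2 : k < 10 ^ (v.length + 1) := by
    rw [← hdec, hdv]
    have := pv_decode_lt (d :: v) (fun e he => hdigk e (hdv ▸ he))
    simpa using this
  have hlt1 : k < 10 ^ (u.length + 1) := by
    have := pv_decode_lt (c :: u) hdig
    simpa [hk] using this
  have hlen : v.length = u.length := by
    by_contra hne'
    rcases Nat.lt_or_ge v.length u.length with h | h
    · have : 10 ^ (v.length + 1) ≤ 10 ^ u.length := Nat.pow_le_pow_right (by norm_num) (by omega)
      omega
    · have hvu : u.length < v.length := by omega
      have : 10 ^ (u.length + 1) ≤ 10 ^ v.length := Nat.pow_le_pow_right (by norm_num) (by omega)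
      omega
  apply pv_decode_inj_len
  · rw [hdv]; simp [hlen]
  · exact hdigk
  · exact hdig
  · rw [hdec]

-- string plumbing
theorem pv_slice_drop (s : String) (k : Nat) :
    (PySem.Str.slice s (some (k : Int)) none).toList = s.toList.drop k := by
  simp [PySem.Str.slice, PySem.List.slice_from _ (by omega : (0:Int) ≤ (k : Int))]

theorem pv_len_eq (s : String) : PySem.Str.len s = (s.toList.length : Int) := by
  simp [PySem.Str.len]

theorem pv_startswith_iff (s p : String) :
    PySem.Str.startswith s p = true ↔ p.toList <+: s.toList := by
  simp [PySem.Str.startswith, PySem.Chars.startswith]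

-- what it means for one name to mark slot j of the table
def pvMarks (base : String) (name : String) (j : Nat) : Prop :=
  PySem.Str.startswith name (base ++ "-") = true ∧
  PySem.Str.strIsdigit (pvSuffix base name) = true ∧
  PySem.Str.pyGet? (pvSuffix base name) 0 ≠ some '0' ∧
  pvParse (pvSuffix base name).toList = (j : Int) + 2

theorem pv_suffix_toList (base name : String) (tail : List Char)
    (h : name.toList = (base ++ "-").toList ++ tail) :
    (pvSuffix base name).toList = tail := by
  unfold pvSuffix
  rw [pv_len_eq, pv_slice_drop, h, List.drop_left]

theorem pv_toChars_nat (j : Nat) :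
    PySem.Int.toChars ((j : Int) + 2) = Nat.toDigits 10 (j + 2) := by
  have h1 : ¬ ((j : Int) + 2 < 0) := by omega
  have h2 : ((j : Int) + 2).toNat = j + 2 := by omega
  simp only [PySem.Int.toChars, if_neg h1, h2]

theorem pv_str_pyGet0 (s : String) : PySem.Str.pyGet? s 0 = s.toList[0]? := by
  simp [PySem.List.pyGet?_zero]

theorem pv_strIsdigit_toList (s : String) :
    PySem.Str.strIsdigit s = PySem.Chars.strIsdigit s.toList := by
  simp

theorem pv_marks_iff (base name : String) (j : Nat) :
    pvMarks base name j ↔ name = base ++ "-" ++ PySem.Int.toStr ((j : Int) + 2) := by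
  constructor
  · rintro ⟨h1, h2, h3, h4⟩
    obtain ⟨tail, htail⟩ := (pv_startswith_iff name (base ++ "-")).mp h1
    have hs := pv_suffix_toList base name tail htail.symm
    have h2' : PySem.Chars.strIsdigit tail = true := by
      rw [← hs, ← pv_strIsdigit_toList]
      exact h2
    simp only [PySem.Chars.strIsdigit, Bool.and_eq_true, Bool.not_eq_true',
      List.isEmpty_eq_false_iff, List.all_eq_true] at h2'
    obtain ⟨hne, hall⟩ := h2'
    obtain ⟨c, u, rfl⟩ := List.exists_cons_of_ne_nil hne
    have h3' : c ≠ '0' := by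
      intro hc
      apply h3
      rw [pv_str_pyGet0, hs, hc]
      rfl
    have h4' : pvDecode (c :: u) = j + 2 := by
      rw [hs, pv_parse_eq_decode _ hall] at h4
      omega
    have hrt : Nat.toDigits 10 (j + 2) = c :: u := by
      rw [← h4']
      exact pv_toDigits_decode (c :: u) hne hall
        (fun c' t' hct => by
          rw [List.cons.injEq] at hct
          exact hct.1 ▸ h3')
    apply pv_toList_inj
    rw [pv_cand_toList, pv_toChars_nat, hrt, ← htail]
  · intro h
    subst h
    have hpre : (base ++ "-" ++ PySem.Int.toStr ((j : Int) + 2)).toList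
        = (base ++ "-").toList ++ Nat.toDigits 10 (j + 2) := by
      rw [pv_cand_toList, pv_toChars_nat]
    have hs := pv_suffix_toList base _ (Nat.toDigits 10 (j + 2)) hpre
    have hall : ∀ c ∈ Nat.toDigits 10 (j + 2), PySem.Chars.isdigit c = true :=
      fun c hc => pv_digits_toDigitsCore (j + 3) (j + 2) c hc
    have hne : Nat.toDigits 10 (j + 2) ≠ [] := pv_toDigitsCore_ne_nil (j + 3) (j + 2) (by omega)
    obtain ⟨c, u, hcu⟩ := List.exists_cons_of_ne_nil hne
    have hlt : j + 2 < 10 ^ (j + 3) := by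
      calc j + 2 < j + 3 := Nat.lt_succ_self _
      _ ≤ 10 ^ (j + 3) := Nat.le_of_lt (Nat.lt_pow_self (by norm_num))
    have hc0 : c ≠ '0' := pv_head_ne_zero (j + 3) (j + 2) (by omega) hlt c u hcu
    refine ⟨?_, ?_, ?_, ?_⟩
    · exact (pv_startswith_iff _ _).mpr ⟨Nat.toDigits 10 (j + 2), hpre.symm⟩
    · have : PySem.Chars.strIsdigit (Nat.toDigits 10 (j + 2)) = true := by
        simp only [PySem.Chars.strIsdigit, Bool.and_eq_true, Bool.not_eq_true',
          List.isEmpty_eq_false_iff, List.all_eq_true]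
        exact ⟨hne, hall⟩
      rw [← hs] at this
      rw [pv_strIsdigit_toList]
      exact this
    · have hval : PySem.Str.pyGet? (pvSuffix base (base ++ "-" ++ PySem.Int.toStr ((j : Int) + 2))) 0 = some c := by
        rw [pv_str_pyGet0, hs, hcu]
        rfl
      rw [hval]
      intro hc
      exact hc0 (by simpa using hc)
    · rw [hs, pv_parse_eq_decode _ hall, pv_decode_toDigits]
      push_cast
      ring

theorem pv_step (base : String) (m : Nat) (acc : List Bool) (x : String)
    (h : acc.length = m + 1) (j : Nat) (hj : j < m + 1) :
    (pvMarkStep base m acc x).length = m + 1 ∧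
    ((pvMarkStep base m acc x).getD j false = true ↔ (acc.getD j false = true ∨ pvMarks base x j)) := by
  unfold pvMarkStep
  split_ifs with h1 h2 h3
  · -- the name marks a slot in range
    obtain ⟨hn2, hnm⟩ := h3
    set n := pvParse (pvSuffix base x).toList with hn
    have hk : n - 2 = (((n - 2).toNat : Nat) : Int) := by omega
    set k := (n - 2).toNat with hkdef
    have hkm : k < acc.length := by omega
    rw [hk, PySem.List.pySetD_natCast]
    refine ⟨by simpa using h, ?_⟩
    by_cases hjk : j = k
    · subst hjk
      rw [List.getD_eq_getElem?_getD, List.getElem?_set_self hkm]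
      simp only [Option.getD_some, true_iff]
      exact Or.inr ⟨h1, h2.1, h2.2, by omega⟩
    · rw [List.getD_eq_getElem?_getD, List.getElem?_set_ne (fun he => hjk he.symm),
        ← List.getD_eq_getElem?_getD]
      constructor
      · exact Or.inl
      · rintro (ha | ⟨-, -, -, hp⟩)
        · exact ha
        · exact absurd (by omega : j = k) hjk
  · -- the parsed number is out of the table's range
    refine ⟨h, ?_⟩
    constructor
    · exact Or.inl
    · rintro (ha | ⟨-, -, -, hp⟩)
      · exact ha
      · exact absurd ⟨by omega, by omega⟩ h3
  · -- not a canonical digit suffix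
    refine ⟨h, ?_⟩
    constructor
    · exact Or.inl
    · rintro (ha | ⟨-, hm1, hm2, -⟩)
      · exact ha
      · exact absurd ⟨hm1, hm2⟩ h2
  · -- name does not start with "base-"
    refine ⟨h, ?_⟩
    constructor
    · exact Or.inl
    · rintro (ha | ⟨hm1, -⟩)
      · exact ha
      · exact absurd hm1 h1

theorem pv_fold_inv (base : String) (m : Nat) (L : List String) :
    ∀ acc : List Bool, acc.length = m + 1 →
      (L.foldl (pvMarkStep base m) acc).length = m + 1 ∧
      ∀ j : Nat, j < m + 1 →
        ((L.foldl (pvMarkStep base m) acc).getD j false = true ↔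
          (acc.getD j false = true ∨ ∃ name ∈ L, pvMarks base name j)) := by
  induction L with
  | nil => intro acc h; exact ⟨h, fun j hj => by simp⟩
  | cons x L ih =>
    intro acc h
    have hs := fun j hj => pv_step base m acc x h j hj
    have hlen : (pvMarkStep base m acc x).length = m + 1 := (pv_step base m acc x h 0 (by omega)).1
    obtain ⟨h1, h2⟩ := ih (pvMarkStep base m acc x) hlen
    refine ⟨by simpa using h1, ?_⟩
    intro j hj
    rw [List.foldl_cons, h2 j hj, (hs j hj).2]
    simp only [List.mem_cons]
    constructor
    · rintro ((ha | hx) | ⟨name, hn, hm⟩)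
      · exact Or.inl ha
      · exact Or.inr ⟨x, Or.inl rfl, hx⟩
      · exact Or.inr ⟨name, Or.inr hn, hm⟩
    · rintro (ha | ⟨name, (rfl | hn), hm⟩)
      · exact Or.inl (Or.inl ha)
      · exact Or.inl (Or.inr hm)
      · exact Or.inr ⟨name, hn, hm⟩

-- slot j is marked iff the candidate j+2 is taken
theorem pv_seen_iff (base : String) (used : List String) (j : Nat) (hj : j < used.length + 1) :
    ((used.foldl (pvMarkStep base used.length) (List.replicate (used.length + 1) false)).getD j false = true
      ↔ (base ++ "-" ++ PySem.Int.toStr ((j : Int) + 2)) ∈ used) := by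
  obtain ⟨-, h2⟩ := pv_fold_inv base used.length used (List.replicate (used.length + 1) false) (by simp)
  rw [h2 j hj]
  have h0 : (List.replicate (used.length + 1) false).getD j false = false := by
    rw [List.getD_eq_getElem?_getD]; simp
  rw [h0]
  simp only [Bool.false_eq_true, false_or]
  constructor
  · rintro ⟨name, hn, hm⟩
    rw [pv_marks_iff] at hm
    exact hm ▸ hn
  · intro hmem
    exact ⟨_, hmem, (pv_marks_iff base _ j).mpr rfl⟩

theorem pv_seen_length (base : String) (used : List String) :
    (used.foldl (pvMarkStep base used.length) (List.replicate (used.length + 1) false)).length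
      = used.length + 1 :=
  (pv_fold_inv base used.length used (List.replicate (used.length + 1) false) (by simp)).1

-- ===== VERDICT (by name: the statement is the Claim_ definition above) =====
theorem disambiguate_nickname_spec : Claim_equal_disambiguate_nickname := by
  intro base used _
  unfold Spec_disambiguate_nickname disambiguate_nickname disambiguate_nickname_alt
  by_cases hb : base ∈ used
  · simp only [hb, if_true]
    set seen := used.foldl (pvMarkStep base used.length) (List.replicate (used.length + 1) false) with hseen
    have hlen : seen.length = used.length + 1 := pv_seen_length base used
    -- a free slot exists
    have hmiss : ∃ j : Nat, j < used.length + 1 ∧ seen.getD j false = false := by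
      obtain ⟨j, hj, hnm⟩ := pv_exists_not_mem
        (fun j => base ++ "-" ++ PySem.Int.toStr ((j : Int) + 2))
        (fun a b h => by
          have := pv_cand_inj base ((a : Int) + 2) ((b : Int) + 2) (by omega) (by omega) h
          omega) used
      refine ⟨j, hj, ?_⟩
      have := (pv_seen_iff base used j hj)
      rw [← hseen] at this
      cases hgd : seen.getD j false
      · rfl
      · exact absurd (this.mp hgd) hnm
    have hfalse : false ∈ seen := by
      obtain ⟨j, hj, hgd⟩ := hmiss
      have hjl : j < seen.length := by omega
      have : seen.getD j false = seen[j] := List.getD_eq_getElem seen false hjl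
      rw [this] at hgd
      exact hgd ▸ List.getElem_mem hjl
    cases hidx : PySem.List.index? seen false with
    | none => exact absurd hfalse ((PySem.List.index?_eq_none_iff seen false).mp hidx)
    | some j0 =>
      obtain ⟨pre, suf, hdec, hlen0, hnotin⟩ := (PySem.List.index?_eq_some_iff seen false j0).mp hidx
      have hj0 : j0 < used.length + 1 := by
        have : seen.length = pre.length + 1 + suf.length := by rw [hdec]; simp; omega
        omega
      -- slot j0 is free, all slots below are taken
      have hfree : seen.getD j0 false = false := by
        rw [hdec, List.getD_eq_getElem?_getD, ← hlen0, List.getElem?_append_right le_rfl]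
        simp
      have htaken : ∀ k, k < j0 → seen.getD k false = true := by
        intro k hk
        rw [hdec, List.getD_eq_getElem?_getD, List.getElem?_append_left (by omega)]
        have hkp : k < pre.length := by omega
        rw [List.getElem?_eq_getElem hkp]
        cases hpk : pre[k] with
        | true => rfl
        | false => exact absurd (hpk ▸ List.getElem_mem hkp) hnotin
      rw [pv_loopA_eq_scan]
      rw [pv_scan_eq (fun k => decide (base ++ "-" ++ PySem.Int.toStr k ∈ used))
        (used.length + 1) 2 ((j0 : Int) + 2) (by omega) (by omega ) ?_ ?_]
      · simp
      · intro j hj1 hj2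
        have hk : ∃ k : Nat, (j : Int) = (k : Int) + 2 ∧ k < j0 := by
          refine ⟨(j - 2).toNat, by omega, by omega⟩
        obtain ⟨k, hkj, hkl⟩ := hk
        rw [hkj]
        simp only [decide_eq_true_eq]
        have := pv_seen_iff base used k (by omega)
        rw [← hseen] at this
        exact this.mp (htaken k hkl)
      · simp only [decide_eq_false_iff_not]
        have := pv_seen_iff base used j0 hj0
        rw [← hseen] at this
        intro hmem
        rw [this.mpr hmem] at hfree
        simp at hfree
  · simp [hb]
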